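-- pv_equiv track=rewrite | github.com/casperbroch/strategic_voting | btva_exp_main.py | apply_strategic_voting
-- ===== SOURCE A (Python) =====
-- import copy
-- from itertools import permutations
--
-- def voting_scheme(preferences):
--     vote_count = {}
--     for pref in preferences:
--         top = pref[0]
--         vote_count[top] = vote_count.get(top, 0) + 1
--     max_votes = max(vote_count.values())
--     winners = [cand for cand, count in vote_count.items() if count == max_votes]
--     winners.sort()
--     return winners[0]
--
-- def compute_happiness(true_preferences, outcome):
--     happiness_scores = []
--     for pref in true_preferences:
--         if outcome in pref:
--             rank = pref.index(outcome)
--             happiness = len(pref) - rank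
--         else:
--             happiness = 0
--         happiness_scores.append(happiness)
--     return happiness_scores
--
-- def apply_strategic_voting(preferences, true_preferences):
--     new_preferences = copy.deepcopy(preferences)
--     num_voters = len(new_preferences)
--
--     current_outcome = voting_scheme(new_preferences)
--     current_happiness = compute_happiness(true_preferences, current_outcome)
--
--     changes = 0
--     for v in range(num_voters):
--         original_ranking = new_preferences[v]
--         original_happiness = current_happiness[v]
--
--         best_perm = None
--         best_gain = 0
--
--         for perm in permutations(original_ranking):
--             perm_list = list(perm)
--             if perm_list == original_ranking:
--                 continue
--
--             trial_prefs = copy.deepcopy(new_preferences)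
--             trial_prefs[v] = perm_list
--
--             outcome = voting_scheme(trial_prefs)
--             new_happiness = compute_happiness(true_preferences, outcome)
--
--             gain = new_happiness[v] - original_happiness
--             if gain > best_gain:
--                 best_gain = gain
--                 best_perm = perm_list
--
--         if best_perm is not None:
--             new_preferences[v] = best_perm
--             changes += 1
--             current_outcome = voting_scheme(new_preferences)
--             current_happiness = compute_happiness(true_preferences, current_outcome)
--
--     return new_preferences, changes
-- ===== SOURCE B (Python) =====
-- def apply_strategic_voting(preferences, true_preferences):
--     # Plurality outcome depends only on top choices, so each voter only needs to
--     # try putting each of their m candidates on top (m options) instead of all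
--     # m! permutations; ties/choice order match A's first-improving-argmax rule.
--     prefs = [list(p) for p in preferences]
--     changes = 0
--     for v in range(len(prefs)):
--         tp = true_preferences[v]
--
--         others = {}
--         for u, p in enumerate(prefs):
--             if u != v:
--                 others[p[0]] = others.get(p[0], 0) + 1
--
--         def result(c):
--             counts = dict(others)
--             counts[c] = counts.get(c, 0) + 1
--             best = max(counts.values())
--             return min(k for k, cnt in counts.items() if cnt == best)
--
--         def happiness(c):
--             return len(tp) - tp.index(c) if c in tp else 0
--
--         base = happiness(result(prefs[v][0]))
--         best_i, best_gain = None, 0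
--         for i, c in enumerate(prefs[v]):
--             gain = happiness(result(c)) - base
--             if gain > best_gain:
--                 best_i, best_gain = i, gain
--         if best_i is not None:
--             r = prefs[v]
--             prefs[v] = [r[best_i]] + r[:best_i] + r[best_i + 1:]
--             changes += 1
--     return prefs, changes
-- ===== Notes on version B (the rewrite author's own statement) =====
-- stated objective: faster
-- what changed: The plurality outcome depends only on each ballot's top entry, so B evaluates the m candidate tops of a voter against an incrementally-built vote-count dict of the other voters' tops instead of deep-copying the whole profile and re-running the election for each of the m! permutations of the ballot; the first strictly-improving argmax tie-break and the resulting reordered ballot are identical.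
import Mathlib
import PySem

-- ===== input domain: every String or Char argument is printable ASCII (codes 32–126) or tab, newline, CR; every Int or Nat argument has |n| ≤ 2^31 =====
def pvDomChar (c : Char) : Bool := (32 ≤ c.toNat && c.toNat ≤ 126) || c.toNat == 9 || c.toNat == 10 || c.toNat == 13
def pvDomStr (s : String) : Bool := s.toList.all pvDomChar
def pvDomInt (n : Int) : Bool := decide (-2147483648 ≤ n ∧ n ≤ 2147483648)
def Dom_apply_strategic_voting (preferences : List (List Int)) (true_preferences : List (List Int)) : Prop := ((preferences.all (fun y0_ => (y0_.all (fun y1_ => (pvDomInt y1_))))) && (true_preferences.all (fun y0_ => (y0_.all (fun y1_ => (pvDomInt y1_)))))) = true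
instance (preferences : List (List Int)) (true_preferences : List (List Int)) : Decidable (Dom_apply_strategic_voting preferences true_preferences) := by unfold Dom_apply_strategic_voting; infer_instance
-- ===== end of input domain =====

-- B replaces A's per-voter scan of all m! ballot permutations (each with a deepcopy and a full
-- re-election) by a scan of the m possible top candidates against a vote count of the other
-- voters' tops; same first-strictly-improving argmax and identical results on all admitted inputs.


-- ===== PORT A =====

-- pref[0] / p[0] (a ballot's top entry; Pre_ guarantees ballots are nonempty) — used by both ports
def pvHead (p : List Int) : Int := PySem.List.pyGetD p 0 0

-- helper voting_scheme of A
def voting_scheme (preferences : List (List Int)) : Int :=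
  let vote_count : PySem.Dict Int Int :=
    preferences.foldl (fun d pref =>
      d.insert (pvHead pref) (d.getD (pvHead pref) 0 + 1)) PySem.Dict.empty
  let max_votes := (PySem.List.max? vote_count.values (fun y => y)).getD 0
  let winners := (vote_count.items.filter (fun p => p.2 == max_votes)).map (fun p => p.1)
  let winners := PySem.List.sorted winners (fun x => x) false
  PySem.List.pyGetD winners 0 0

-- helper compute_happiness of A (the append loop)
def compute_happiness (true_preferences : List (List Int)) (outcome : Int) : List Int :=
  true_preferences.foldl (fun acc pref =>
    acc ++ [if outcome ∈ pref
            then (pref.length : Int) - (((PySem.List.index? pref outcome).getD 0 : Nat) : Int)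
            else 0]) []

-- body of A's inner 'for perm in permutations(original_ranking)' loop
def asvPermStep (true_preferences : List (List Int)) (new_preferences : List (List Int))
    (v : Nat) (original_ranking : List Int) (original_happiness : Int)
    (bb : Option (List Int) × Int) (perm_list : List Int) : Option (List Int) × Int :=
  if perm_list = original_ranking then bb
  else
    let trial_prefs := new_preferences.set v perm_list
    let outcome := voting_scheme trial_prefs
    let new_happiness := compute_happiness true_preferences outcome
    let gain := PySem.List.pyGetD new_happiness (v : Int) 0 - original_happiness
    if bb.2 < gain then (some perm_list, gain) else bb

-- body of A's outer 'for v in range(num_voters)' loop; state = (new_preferences, current_outcome, current_happiness, changes)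
def asvStepA (true_preferences : List (List Int))
    (st : List (List Int) × Int × List Int × Int) (v : Nat) :
    List (List Int) × Int × List Int × Int :=
  let new_preferences := st.1
  let original_ranking := PySem.List.pyGetD new_preferences (v : Int) []
  let original_happiness := PySem.List.pyGetD st.2.2.1 (v : Int) 0
  let bb := (PySem.List.permutations original_ranking original_ranking.length).foldl
    (asvPermStep true_preferences new_preferences v original_ranking original_happiness)
    ((none : Option (List Int)), (0 : Int))
  match bb.1 with
  | some best_perm =>
      let np := new_preferences.set v best_perm
      let o := voting_scheme np
      (np, o, compute_happiness true_preferences o, st.2.2.2 + 1)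
  | none => st

def apply_strategic_voting (preferences : List (List Int)) (true_preferences : List (List Int)) :
    List (List Int) × Int :=
  let num_voters := preferences.length
  let current_outcome := voting_scheme preferences
  let current_happiness := compute_happiness true_preferences current_outcome
  let st := (List.range num_voters).foldl (asvStepA true_preferences)
    (preferences, current_outcome, current_happiness, (0 : Int))
  (st.1, st.2.2.2)

-- ===== PORT B =====

-- Source B inner def result(c): plurality winner when voter v's top is c, others' tops fixed
def alt_result (others : PySem.Dict Int Int) (c : Int) : Int :=
  let counts := others.insert c (others.getD c 0 + 1)
  let best := (PySem.List.max? counts.values (fun y => y)).getD 0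
  (PySem.List.min? ((counts.items.filter (fun p => p.2 == best)).map (fun p => p.1))
    (fun y => y)).getD 0

-- Source B inner def happiness(c)
def alt_happiness (tp : List Int) (c : Int) : Int :=
  if c ∈ tp then (tp.length : Int) - (((PySem.List.index? tp c).getD 0 : Nat) : Int) else 0

-- Source B 'others' loop: vote counts of the other voters' tops
def alt_others (prefs : List (List Int)) (v : Nat) : PySem.Dict Int Int :=
  (PySem.List.enumerate prefs).foldl (fun d up =>
    if up.1 ≠ (v : Int) then d.insert (pvHead up.2) (d.getD (pvHead up.2) 0 + 1) else d)
    PySem.Dict.empty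

-- body of Source B's 'for v in range(len(prefs))' loop; state = (prefs, changes)
def asvStepB (true_preferences : List (List Int)) (st : List (List Int) × Int) (v : Nat) :
    List (List Int) × Int :=
  let prefs := st.1
  let tp := PySem.List.pyGetD true_preferences (v : Int) []
  let others := alt_others prefs v
  let r := PySem.List.pyGetD prefs (v : Int) []
  let base := alt_happiness tp (alt_result others (pvHead r))
  let bi := (PySem.List.enumerate r).foldl (fun bi ic =>
      let gain := alt_happiness tp (alt_result others ic.2) - base
      if bi.2 < gain then (some ic.1, gain) else bi)
    ((none : Option Int), (0 : Int))
  match bi.1 with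
  | some i =>
      (prefs.set v (PySem.List.pyGetD r i 0 ::
        (PySem.List.slice r none (some i) ++ PySem.List.slice r (some (i + 1)) none)),
       st.2 + 1)
  | none => st

def apply_strategic_voting_alt (preferences : List (List Int)) (true_preferences : List (List Int)) :
    List (List Int) × Int :=
  (List.range preferences.length).foldl (asvStepB true_preferences) (preferences, (0 : Int))

-- ===== PRECONDITION & SPEC =====

-- Pre_ excludes exactly the inputs where the Python A raises: an empty profile (ValueError in
-- max()), an empty ballot (IndexError pref[0]), or fewer true_preferences rows than voters
-- (IndexError current_happiness[v]).
def Pre_apply_strategic_voting (preferences : List (List Int)) (true_preferences : List (List Int)) : Prop :=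
  preferences ≠ [] ∧ (∀ p ∈ preferences, p ≠ []) ∧ preferences.length ≤ true_preferences.length

instance (preferences : List (List Int)) (true_preferences : List (List Int)) :
    Decidable (Pre_apply_strategic_voting preferences true_preferences) := by
  unfold Pre_apply_strategic_voting; infer_instance

def pvWitness_apply_strategic_voting : List (List Int) × List (List Int) :=
  ([[1, 2], [2, 1], [2, 1]], [[1, 2], [2, 1], [2, 1]])

def Spec_apply_strategic_voting (preferences : List (List Int)) (true_preferences : List (List Int)) (out : List (List Int) × Int) : Prop := out = apply_strategic_voting_alt preferences true_preferences
instance (preferences : List (List Int)) (true_preferences : List (List Int)) (out : List (List Int) × Int) : Decidable (Spec_apply_strategic_voting preferences true_preferences out) := by unfold Spec_apply_strategic_voting; infer_instance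

-- ===== CLAIM (what is proved, stated in full; the proofs are below) =====
def Claim_equal_apply_strategic_voting : Prop := ∀ (preferences : List (List Int)) (true_preferences : List (List Int)), Dom_apply_strategic_voting preferences true_preferences → Pre_apply_strategic_voting preferences true_preferences → Spec_apply_strategic_voting preferences true_preferences (apply_strategic_voting preferences true_preferences)

-- ===== LEMMAS AND PROOFS =====

-- the list of top entries of a profile
def headsOf (prefs : List (List Int)) : List Int := prefs.map pvHead

-- specification winner: least candidate among those whose count in hs is maximal
def cntMax (hs : List Int) : Int :=
  (PySem.List.max? ((PySem.Set.ofList hs).map (fun k => (hs.count k : Int))) (fun y => y)).getD 0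

def plur (hs : List Int) : Int :=
  (PySem.List.min? ((PySem.Set.ofList hs).filter (fun k => (hs.count k : Int) == cntMax hs))
    (fun y => y)).getD 0

theorem max_getD_perm {xs ys : List Int} (h : xs.Perm ys) :
    (PySem.List.max? xs (fun y => y)).getD 0 = (PySem.List.max? ys (fun y => y)).getD 0 := by
  cases h1 : PySem.List.max? xs (fun y => y) with
  | none =>
    have hx := (PySem.List.max?_eq_none_iff (key := fun y : Int => y) (xs := xs)).mp h1
    subst hx
    rw [(PySem.List.max?_eq_none_iff (key := fun y : Int => y) (xs := ys)).mpr h.nil_eq.symm]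
  | some m =>
    have hm : m ∈ ys := h.mem_iff.mp (PySem.List.max?_mem h1)
    cases h2 : PySem.List.max? ys (fun y => y) with
    | none =>
      rw [(PySem.List.max?_eq_none_iff (key := fun y : Int => y) (xs := ys)).mp h2] at hm
      simp at hm
    | some m' =>
      have hm' : m' ∈ xs := h.mem_iff.mpr (PySem.List.max?_mem h2)
      have l1 := PySem.List.max?_isMax h1 m' hm'
      have l2 := PySem.List.max?_isMax h2 m hm
      simp only [Option.getD_some]
      exact le_antisymm l2 l1

theorem min_getD_perm {xs ys : List Int} (h : xs.Perm ys) :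
    (PySem.List.min? xs (fun y => y)).getD 0 = (PySem.List.min? ys (fun y => y)).getD 0 := by
  cases h1 : PySem.List.min? xs (fun y => y) with
  | none =>
    have hx := (PySem.List.min?_eq_none_iff (key := fun y : Int => y) (xs := xs)).mp h1
    subst hx
    rw [(PySem.List.min?_eq_none_iff (key := fun y : Int => y) (xs := ys)).mpr h.nil_eq.symm]
  | some m =>
    have hm : m ∈ ys := h.mem_iff.mp (PySem.List.min?_mem h1)
    cases h2 : PySem.List.min? ys (fun y => y) with
    | none =>
      rw [(PySem.List.min?_eq_none_iff (key := fun y : Int => y) (xs := ys)).mp h2] at hm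
      simp at hm
    | some m' =>
      have hm' : m' ∈ xs := h.mem_iff.mpr (PySem.List.min?_mem h2)
      have l1 := PySem.List.min?_isMin h1 m' hm'
      have l2 := PySem.List.min?_isMin h2 m hm
      simp only [Option.getD_some]
      exact le_antisymm l1 l2

theorem sorted_head_min (ws : List Int) :
    PySem.List.pyGetD (PySem.List.sorted ws (fun x => x) false) 0 0
      = (PySem.List.min? ws (fun y => y)).getD 0 := by
  cases hs : PySem.List.sorted ws (fun x => x) false with
  | nil =>
    have : ws = [] := (PySem.List.sorted_eq_nil_iff ws (fun x : Int => x) false).mp hs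
    subst this
    simp [PySem.List.pyGetD, PySem.List.pyGet?, PySem.List.pyIdx?, PySem.List.min?]
  | cons m t =>
    have hperm : (m :: t).Perm ws := hs ▸ PySem.List.sorted_perm ws (fun x : Int => x) false
    have hmem : m ∈ ws := hperm.mem_iff.mp (List.mem_cons_self ..)
    have hle : ∀ y ∈ ws, m ≤ y := PySem.List.key_head_sorted_le ws (fun x : Int => x) hs
    cases h2 : PySem.List.min? ws (fun y => y) with
    | none =>
      rw [(PySem.List.min?_eq_none_iff (key := fun y : Int => y) (xs := ws)).mp h2] at hmem
      simp at hmem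
    | some m' =>
      have hm' : m' ∈ ws := PySem.List.min?_mem h2
      have l2 := PySem.List.min?_isMin h2 m hmem
      simp only [Option.getD_some]
      have : PySem.List.pyGetD (m :: t) 0 0 = m := by simp [PySem.List.pyGetD]
      rw [this]
      exact le_antisymm (hle m' hm') l2

-- the min/max composite both ports compute on a counter dict IS plur
theorem counter_minmax (hs : List Int) :
    (PySem.List.min? ((((PySem.Dict.counter hs).items.filter
        (fun p => p.2 == (PySem.List.max? (PySem.Dict.counter hs).values (fun y => y)).getD 0)).map
        (fun p => p.1))) (fun y => y)).getD 0 = plur hs := by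
  unfold plur cntMax
  simp only [PySem.Dict.values, PySem.Dict.items_counter, List.map_map, List.filter_map]
  simp only [Function.comp_def]
  simp

theorem voting_scheme_eq_plur (prefs : List (List Int)) :
    voting_scheme prefs = plur (headsOf prefs) := by
  unfold voting_scheme
  dsimp only
  rw [show (prefs.foldl (fun d pref => d.insert (pvHead pref) (d.getD (pvHead pref) 0 + 1))
      PySem.Dict.empty) = PySem.Dict.counter (headsOf prefs) by
    rw [headsOf, ← PySem.Dict.foldl_insert_getD_add_one_eq_counter, List.foldl_map]]
  rw [sorted_head_min, counter_minmax]

theorem ofList_perm {hs hs' : List Int} (h : hs.Perm hs') :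
    (PySem.Set.ofList hs).Perm (PySem.Set.ofList hs') := by
  rw [List.perm_ext_iff_of_nodup (PySem.Set.nodup_ofList hs) (PySem.Set.nodup_ofList hs')]
  intro a
  rw [PySem.Set.mem_ofList, PySem.Set.mem_ofList]
  exact h.mem_iff

theorem plur_perm {hs hs' : List Int} (h : hs.Perm hs') : plur hs = plur hs' := by
  have hcnt : ∀ a : Int, hs.count a = hs'.count a := fun a => h.count_eq a
  have hof := ofList_perm h
  have hM : cntMax hs = cntMax hs' := by
    unfold cntMax
    apply max_getD_perm
    have : (PySem.Set.ofList hs).map (fun k => (hs.count k : Int))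
        = (PySem.Set.ofList hs).map (fun k => (hs'.count k : Int)) := by
      apply List.map_congr_left; intro a _; rw [hcnt a]
    rw [this]
    exact hof.map _
  unfold plur
  apply min_getD_perm
  rw [hM]
  have : (PySem.Set.ofList hs).filter (fun k => (hs.count k : Int) == cntMax hs')
      = (PySem.Set.ofList hs).filter (fun k => (hs'.count k : Int) == cntMax hs') := by
    apply List.filter_congr; intro a _; rw [hcnt a]
  rw [this]
  exact hof.filter _

theorem set_perm_erase (hs : List Int) (v : Nat) (c : Int) (hv : v < hs.length) :
    (hs.set v c).Perm (hs.eraseIdx v ++ [c]) := by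
  rw [List.set_eq_take_append_cons_drop, if_pos hv, List.eraseIdx_eq_take_drop_succ]
  exact List.perm_middle.trans (List.perm_append_singleton _ _).symm

theorem happiness_get (tps : List (List Int)) (o : Int) (v : Nat) :
    PySem.List.pyGetD (compute_happiness tps o) (v : Int) 0
      = alt_happiness (PySem.List.pyGetD tps (v : Int) []) o := by
  unfold compute_happiness
  rw [PySem.List.foldl_append_singleton_eq_map]
  rw [List.nil_append, PySem.List.pyGetD_natCast, PySem.List.pyGetD_natCast]
  by_cases hv : v < tps.length
  · rw [List.getD_eq_getElem _ _ (by simpa using hv), List.getD_eq_getElem _ _ hv,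
      List.getElem_map]
    rfl
  · rw [List.getD_eq_default _ _ (by simpa using not_lt.mp hv),
      List.getD_eq_default _ _ (by simpa using not_lt.mp hv)]
    simp [alt_happiness]

theorem enum_filter_map (xs : List (List Int)) : ∀ (v : Nat) (s : Int),
    ((PySem.List.enumerate xs s).filter (fun p => decide (p.1 ≠ s + (v : Int)))).map (fun p => p.2)
      = xs.eraseIdx v := by
  induction xs with
  | nil => intro v s; simp [PySem.List.enumerate_nil]
  | cons x t ih =>
    intro v s
    rw [PySem.List.enumerate_cons]
    cases v with
    | zero =>
      rw [List.filter_cons]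
      simp only [Nat.cast_zero, add_zero, ne_eq, not_true_eq_false, decide_false,
        Bool.false_eq_true, if_false]
      have hall : ∀ p ∈ PySem.List.enumerate t (s + 1), decide (p.1 ≠ s) = true := by
        intro p hp
        obtain ⟨k, hk, rfl⟩ := (PySem.List.mem_enumerate_iff _ _ _).mp hp
        simp only [decide_eq_true_eq]
        omega
      rw [List.filter_eq_self.mpr hall, PySem.List.map_snd_enumerate, List.eraseIdx_zero,
        List.tail_cons]
    | succ w =>
      rw [List.filter_cons]
      have h1 : (decide ((s, x).1 ≠ s + ((w : Nat) + 1 : Nat))) = true := by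
        simp only [decide_eq_true_eq]; push_cast; omega
      rw [if_pos h1, List.map_cons, List.eraseIdx_cons_succ]
      have := ih w (s + 1)
      rw [show s + 1 + (w : Int) = s + ((w + 1 : Nat) : Int) by push_cast; ring] at this
      rw [this]

theorem alt_others_counter (prefs : List (List Int)) (v : Nat) :
    alt_others prefs v = PySem.Dict.counter (headsOf (prefs.eraseIdx v)) := by
  unfold alt_others
  rw [PySem.List.foldl_ite_eq_foldl_filter]
  rw [show (List.filter (fun x => decide (x.1 ≠ (v : Int))) (PySem.List.enumerate prefs))
      = (List.filter (fun p => decide (p.1 ≠ 0 + (v : Int))) (PySem.List.enumerate prefs 0)) by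
    simp]
  rw [← PySem.Dict.foldl_insert_getD_add_one_eq_counter, headsOf, ← enum_filter_map prefs v 0,
    List.foldl_map, List.foldl_map]

theorem counter_insert_snoc (hs : List Int) (c : Int) :
    (PySem.Dict.counter hs).insert c ((PySem.Dict.counter hs).getD c 0 + 1)
      = PySem.Dict.counter (hs ++ [c]) := by
  rw [← PySem.Dict.foldl_insert_getD_add_one_eq_counter,
    ← PySem.Dict.foldl_insert_getD_add_one_eq_counter, List.foldl_append]
  rfl

theorem alt_result_eq_plur (prefs : List (List Int)) (v : Nat) (c : Int) :
    alt_result (alt_others prefs v) c = plur (headsOf (prefs.eraseIdx v) ++ [c]) := by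
  unfold alt_result
  rw [alt_others_counter, counter_insert_snoc]
  exact counter_minmax _

-- permutations structure
theorem permutations_head (xs : List Int) :
    ∃ t, PySem.List.permutations xs xs.length = xs :: t := by
  induction xs with
  | nil => exact ⟨[], rfl⟩
  | cons a t ih =>
    obtain ⟨tl, htl⟩ := ih
    rw [List.length_cons, PySem.List.permutations, List.length_cons, List.range_succ_eq_map,
      List.flatMap_cons]
    simp only [List.getElem?_cons_zero, List.eraseIdx_cons_zero, htl, List.map_cons]
    exact ⟨_, rfl⟩

theorem stepB_fst_length (tps : List (List Int)) (st : List (List Int) × Int) (v : Nat) :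
    (asvStepB tps st v).1.length = st.1.length := by
  unfold asvStepB
  dsimp only
  split <;> simp

-- B's reordered ballot for chosen index i (syntactically the list asvStepB builds)
def embB (orig : List Int) (i : Int) : List Int :=
  PySem.List.pyGetD orig i 0 ::
    (PySem.List.slice orig none (some i) ++ PySem.List.slice orig (some (i + 1)) none)

-- the reduced per-candidate argmax steps both inner loops compute
def redA (orig : List Int) (G : Int → Int) (bb : Option (List Int) × Int) (i : Nat) :
    Option (List Int) × Int :=
  if bb.2 < G (orig.getD i 0) then (some (orig.getD i 0 :: orig.eraseIdx i), G (orig.getD i 0))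
  else bb

def redB (orig : List Int) (G : Int → Int) (bi : Option Int × Int) (i : Nat) :
    Option Int × Int :=
  if bi.2 < G (orig.getD i 0) then (some (i : Int), G (orig.getD i 0)) else bi

theorem foldl_fixed {α β : Type} (f : β → α → β) (b : β) (l : List α)
    (h : ∀ x ∈ l, f b x = b) : l.foldl f b = b := by
  induction l with
  | nil => rfl
  | cons x t ih =>
    rw [List.foldl_cons, h x (List.mem_cons_self ..)]
    exact ih (fun y hy => h y (List.mem_cons_of_mem _ hy))

theorem embB_eq (orig : List Int) (i : Nat) :
    embB orig (i : Int) = orig.getD i 0 :: orig.eraseIdx i := by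
  unfold embB
  rw [PySem.List.pyGetD_natCast, PySem.List.slice_to orig (Int.natCast_nonneg i),
    PySem.List.slice_from orig (by omega), Int.toNat_natCast,
    show ((i : Int) + 1).toNat = i + 1 by omega, List.eraseIdx_eq_take_drop_succ]

theorem sync (orig : List Int) (G : Int → Int) : ∀ (l : List Nat) (bg : Int) (bp : Option Int),
    l.foldl (redA orig G) (bp.map (fun i => embB orig i), bg)
      = ((l.foldl (redB orig G) (bp, bg)).1.map (fun i => embB orig i),
         (l.foldl (redB orig G) (bp, bg)).2) := by
  intro l
  induction l with
  | nil => intro bg bp; rfl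
  | cons i t ih =>
    intro bg bp
    rw [List.foldl_cons, List.foldl_cons]
    unfold redA redB
    dsimp only
    by_cases h : bg < G (orig.getD i 0)
    · rw [if_pos h, if_pos h, ← embB_eq]
      exact ih _ (some (i : Int))
    · rw [if_neg h, if_neg h]
      exact ih bg bp

theorem A_block (tps prefs : List (List Int)) (v : Nat) (orig : List Int) (origH : Int)
    (G : Int → Int)
    (hG : ∀ x : List Int, PySem.List.pyGetD (compute_happiness tps
        (voting_scheme (prefs.set v x))) (v : Int) 0 - origH = G (pvHead x))
    (hG0 : G (pvHead orig) = 0)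
    (r : Nat) (i : Nat) (hi : i < orig.length) (hr : (orig.eraseIdx i).length = r)
    (bb : Option (List Int) × Int) (hbb : 0 ≤ bb.2) :
    (List.map (fun p => orig[i]'hi :: p)
        (PySem.List.permutations (orig.eraseIdx i) r)).foldl
        (asvPermStep tps prefs v orig origH) bb
      = redA orig G bb i := by
  have hgd : orig.getD i 0 = orig[i] := List.getD_eq_getElem orig 0 hi
  have hhd : ∀ p : List Int, pvHead (orig[i] :: p) = orig[i] := by
    intro p; simp [pvHead, PySem.List.pyGetD]
  obtain ⟨tl, htl⟩ := permutations_head (orig.eraseIdx i)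
  rw [← hr, htl, List.map_cons]
  have hstep : ∀ (b : Option (List Int) × Int) (p : List Int), orig[i] :: p ≠ orig →
      asvPermStep tps prefs v orig origH b (orig[i] :: p)
        = if b.2 < G orig[i] then (some (orig[i] :: p), G orig[i]) else b := by
    intro b p hne
    unfold asvPermStep
    rw [if_neg hne]
    dsimp only
    rw [hG (orig[i] :: p), hhd p]
  by_cases hlt : bb.2 < G orig[i]
  · have hne : ∀ p : List Int, orig[i] :: p ≠ orig := by
      intro p he
      have hpv : pvHead orig = orig[i] := by
        have h2 := hhd p
        rw [he] at h2
        exact h2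
      have h0 : G orig[i] = 0 := by rw [← hpv]; exact hG0
      rw [h0] at hlt
      omega
    rw [List.foldl_cons, hstep bb _ (hne _), if_pos hlt]
    rw [foldl_fixed _ _ _ (by
      intro x hx
      obtain ⟨p, hp, rfl⟩ := List.mem_map.mp hx
      rw [hstep _ p (hne p)]
      dsimp only
      rw [if_neg (lt_irrefl _)])]
    unfold redA
    rw [hgd, if_pos hlt]
  · rw [foldl_fixed _ _ _ (by
      intro x hx
      rcases List.mem_cons.mp hx with h | h
      · subst h
        by_cases he : orig[i] :: orig.eraseIdx i = orig
        · unfold asvPermStep; rw [if_pos he]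
        · rw [hstep bb _ he, if_neg hlt]
      · obtain ⟨p, hp, rfl⟩ := List.mem_map.mp h
        by_cases he : orig[i] :: p = orig
        · unfold asvPermStep; rw [if_pos he]
        · rw [hstep bb _ he, if_neg hlt])]
    unfold redA
    rw [hgd, if_neg hlt]

theorem foldl_reduce {α σ : Type} (f g : σ → α → σ) (P : σ → Prop) (l : List α)
    (hfg : ∀ b x, x ∈ l → P b → f b x = g b x)
    (hg : ∀ b x, x ∈ l → P b → P (g b x)) :
    ∀ b, P b → l.foldl f b = l.foldl g b := by
  induction l with
  | nil => intro b _; rfl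
  | cons x t ih =>
    intro b hb
    rw [List.foldl_cons, List.foldl_cons, hfg b x (List.mem_cons_self ..) hb]
    exact ih (fun b y hy => hfg b y (List.mem_cons_of_mem _ hy))
      (fun b y hy => hg b y (List.mem_cons_of_mem _ hy)) _
      (hg b x (List.mem_cons_self ..) hb)

theorem A_fold_top (tps prefs : List (List Int)) (v : Nat) (orig : List Int) (origH : Int)
    (G : Int → Int)
    (hG : ∀ x : List Int, PySem.List.pyGetD (compute_happiness tps
        (voting_scheme (prefs.set v x))) (v : Int) 0 - origH = G (pvHead x))
    (hG0 : G (pvHead orig) = 0) :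
    (PySem.List.permutations orig orig.length).foldl (asvPermStep tps prefs v orig origH)
        (none, 0)
      = (List.range orig.length).foldl (redA orig G) (none, 0) := by
  cases orig with
  | nil =>
    show (asvPermStep tps prefs v [] origH) (none, 0) [] = (none, 0)
    unfold asvPermStep
    rw [if_pos rfl]
  | cons o t =>
    rw [List.length_cons, PySem.List.permutations, List.foldl_flatMap]
    refine foldl_reduce _ (redA (o :: t) G) (fun b => 0 ≤ b.2) _ ?_ ?_ _ le_rfl
    · intro b i hi hb
      have h1 : i < (o :: t).length := List.mem_range.mp hi
      rw [List.getElem?_eq_getElem h1]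
      exact A_block tps prefs v (o :: t) origH G hG hG0 t.length i h1
        (by rw [List.length_eraseIdx_of_lt h1]; rfl) b hb
    · intro b i _ hb
      unfold redA
      split
      · rename_i hpos
        exact le_of_lt (lt_of_le_of_lt hb hpos)
      · exact hb

theorem B_fold_top (tp : List Int) (others : PySem.Dict Int Int) (base : Int)
    (orig : List Int) (G : Int → Int)
    (hGB : ∀ c, alt_happiness tp (alt_result others c) - base = G c) :
    (PySem.List.enumerate orig).foldl (fun bi ic =>
        let gain := alt_happiness tp (alt_result others ic.2) - base
        if bi.2 < gain then (some ic.1, gain) else bi) ((none : Option Int), (0 : Int))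
      = (List.range orig.length).foldl (redB orig G) (none, 0) := by
  simp only [hGB]
  rw [PySem.List.enumerate_eq_map_pyRange orig 0, List.foldl_map,
    show PySem.List.pyRange 0 (PySem.List.len orig) = (List.range orig.length).map
        (fun k : Nat => (k : Int)) from by
      rw [show PySem.List.len orig = ((orig.length : Nat) : Int) by simp [PySem.List.len]]
      exact PySem.List.pyRange_zero_natCast orig.length,
    List.foldl_map]
  apply PySem.List.foldl_congr_mem
  intro acc x _
  unfold redB
  dsimp only
  rw [PySem.List.pyGetD_natCast]

-- one voter: the canonical A-state steps to the canonical state of B's step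
theorem voter_eq (tps : List (List Int)) (v : Nat) (prefs : List (List Int)) (ch : Int)
    (hv : v < prefs.length) :
    asvStepA tps (prefs, voting_scheme prefs, compute_happiness tps (voting_scheme prefs), ch) v
      = ((asvStepB tps (prefs, ch) v).1,
         voting_scheme (asvStepB tps (prefs, ch) v).1,
         compute_happiness tps (voting_scheme (asvStepB tps (prefs, ch) v).1),
         (asvStepB tps (prefs, ch) v).2) := by
  have hvh' : v < (headsOf prefs).length := by simpa [headsOf] using hv
  unfold asvStepA asvStepB
  dsimp only
  have horig : PySem.List.pyGetD prefs (v : Int) [] = prefs[v] := by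
    rw [PySem.List.pyGetD_natCast]; exact List.getD_eq_getElem _ _ hv
  have hhv : pvHead prefs[v] = (headsOf prefs)[v]'hvh' := by simp [headsOf]
  have hset_self : (headsOf prefs).set v (pvHead prefs[v]) = headsOf prefs := by
    rw [hhv]; exact List.set_getElem_self ..
  have herase : headsOf (prefs.eraseIdx v) = (headsOf prefs).eraseIdx v := by
    unfold headsOf
    rw [List.eraseIdx_eq_take_drop_succ, List.eraseIdx_eq_take_drop_succ, List.map_append,
      List.map_take, List.map_drop]
  have hres : ∀ c, alt_result (alt_others prefs v) c = plur ((headsOf prefs).set v c) := by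
    intro c
    rw [alt_result_eq_plur, herase]
    exact (plur_perm (set_perm_erase _ v c hvh')).symm
  set TP := PySem.List.pyGetD tps (v : Int) [] with hTP
  set G : Int → Int := fun c =>
    alt_happiness TP (plur ((headsOf prefs).set v c))
      - alt_happiness TP (plur (headsOf prefs)) with hGdef
  have hOH : PySem.List.pyGetD (compute_happiness tps (voting_scheme prefs)) (v : Int) 0
      = alt_happiness TP (plur (headsOf prefs)) := by
    rw [happiness_get, voting_scheme_eq_plur]
  have hG : ∀ x : List Int,
      PySem.List.pyGetD (compute_happiness tps (voting_scheme (prefs.set v x))) (v : Int) 0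
        - PySem.List.pyGetD (compute_happiness tps (voting_scheme prefs)) (v : Int) 0
      = G (pvHead x) := by
    intro x
    rw [hOH, happiness_get, voting_scheme_eq_plur,
      show headsOf (prefs.set v x) = (headsOf prefs).set v (pvHead x) from List.map_set ..]
  have hG0 : G (pvHead (PySem.List.pyGetD prefs (v : Int) [])) = 0 := by
    rw [horig, hGdef]
    dsimp only
    rw [hset_self, sub_self]
  have hGB : ∀ c, alt_happiness TP (alt_result (alt_others prefs v) c)
      - alt_happiness TP (alt_result (alt_others prefs v)
          (pvHead (PySem.List.pyGetD prefs (v : Int) []))) = G c := by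
    intro c
    rw [horig, hres, hres, hset_self]
  rw [A_fold_top tps prefs v _ _ G hG hG0,
    B_fold_top TP (alt_others prefs v) _ _ G hGB]
  have hsync := sync (PySem.List.pyGetD prefs (v : Int) []) G
    (List.range (PySem.List.pyGetD prefs (v : Int) []).length) 0 none
  simp only [Option.map_none] at hsync
  rw [hsync]
  cases hbo : ((List.range (PySem.List.pyGetD prefs (v : Int) []).length).foldl
      (redB (PySem.List.pyGetD prefs (v : Int) []) G) (none, 0)).1 with
  | none =>
    simp only [Option.map_none]
  | some i =>
    simp only [Option.map_some]
    rfl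

theorem main_loop (tps : List (List Int)) :
    ∀ (l : List Nat) (prefs : List (List Int)) (ch : Int), (∀ v ∈ l, v < prefs.length) →
    l.foldl (asvStepA tps)
        (prefs, voting_scheme prefs, compute_happiness tps (voting_scheme prefs), ch)
      = ((l.foldl (asvStepB tps) (prefs, ch)).1,
         voting_scheme (l.foldl (asvStepB tps) (prefs, ch)).1,
         compute_happiness tps (voting_scheme (l.foldl (asvStepB tps) (prefs, ch)).1),
         (l.foldl (asvStepB tps) (prefs, ch)).2) := by
  intro l
  induction l with
  | nil => intro prefs ch _; rfl
  | cons v t ih =>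
    intro prefs ch hl
    rw [List.foldl_cons, List.foldl_cons,
      voter_eq tps v prefs ch (hl v (List.mem_cons_self ..))]
    exact ih (asvStepB tps (prefs, ch) v).1 (asvStepB tps (prefs, ch) v).2 (by
      intro u hu
      rw [stepB_fst_length tps (prefs, ch) v]
      exact hl u (List.mem_cons_of_mem _ hu))

-- ===== VERDICT (by name: the statement is the Claim_ definition above) =====
theorem apply_strategic_voting_spec : Claim_equal_apply_strategic_voting := by
  intro preferences true_preferences _hdom _hpre
  unfold Spec_apply_strategic_voting apply_strategic_voting apply_strategic_voting_alt
  dsimp only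
  rw [main_loop true_preferences (List.range preferences.length) preferences 0
    (by intro v hv; simpa using List.mem_range.mp hv)]
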